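-- pv_equiv track=rewrite | github.com/hevi-public/ErbenBlind | run_batch.py | build_trial_specs
-- ===== SOURCE A (Python) =====
-- from typing import Any, Dict, List, Optional, Tuple
--
-- TrialSpec = Tuple[str, str, str, str, str, int, Optional[int], bool]
--
-- def build_trial_specs(
--     entries: List[Dict[str, str]],
--     runs_per_word: int,
--     include_controls: bool,
--     model: str,
--     num_options: int,
--     seed: Optional[int],
--     dry_run: bool,
-- ) -> List[TrialSpec]:
--     """Build the full list of trial specs from word entries and parameters.
--
--     Each spec is a tuple containing all arguments needed for run_single_trial.
--
--     Args:
--         entries: Parsed word list entries.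
--         runs_per_word: Number of target_present runs per word.
--         include_controls: Whether to add control trials (target_absent, null_trial, random_profile).
--         model: Claude model name.
--         num_options: Number of forced-choice options.
--         seed: Base random seed (each trial gets seed + counter). None for no seeding.
--         dry_run: Whether to skip actual claude CLI calls.
--
--     Returns:
--         List of TrialSpec tuples.
--     """
--     specs: List[TrialSpec] = []
--     counter = 1
--
--     for entry in entries:
--         word = entry["word"]
--         domain = entry["target_domain"]
--
--         # Target-present runs
--         for run in range(runs_per_word):
--             run_id = f"{counter:03d}"
--             trial_seed = (seed + counter) if seed is not None else None
--             specs.append((word, domain, "target_present", run_id, model, num_options, trial_seed, dry_run))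
--             counter += 1
--
--         # Control runs (1 each)
--         if include_controls:
--             for trial_type in ("target_absent", "null_trial", "random_profile"):
--                 run_id = f"{counter:03d}"
--                 trial_seed = (seed + counter) if seed is not None else None
--                 specs.append((word, domain, trial_type, run_id, model, num_options, trial_seed, dry_run))
--                 counter += 1
--
--     return specs
-- ===== SOURCE B (Python) =====
-- from typing import Any, Dict, List, Optional, Tuple
--
-- TrialSpec = Tuple[str, str, str, str, str, int, Optional[int], bool]
--
-- def build_trial_specs(
--     entries: List[Dict[str, str]],
--     runs_per_word: int,
--     include_controls: bool,
--     model: str,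
--     num_options: int,
--     seed: Optional[int],
--     dry_run: bool,
-- ) -> List[TrialSpec]:
--     # Phase 1: flat list of (word, domain, trial_type) base descriptors.
--     base = []
--     for entry in entries:
--         word = entry["word"]
--         domain = entry["target_domain"]
--         base += [(word, domain, "target_present")] * runs_per_word
--         if include_controls:
--             base += [(word, domain, t) for t in ("target_absent", "null_trial", "random_profile")]
--     # Phase 2: number them and assemble the full spec tuples.
--     return [
--         (word, domain, trial_type, f"{counter:03d}", model, num_options,
--          seed + counter if seed is not None else None, dry_run)
--         for counter, (word, domain, trial_type) in enumerate(base, start=1)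
--     ]
-- ===== Notes on version B (the rewrite author's own statement) =====
-- stated objective: alternative
-- what changed: Replaces A's single interleaved loop with a manual counter by a two-phase build-then-number structure: phase 1 builds a flat list of (word, domain, trial_type) descriptors via list repetition, phase 2 numbers them with enumerate(start=1) and assembles the tuples.
import Mathlib
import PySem

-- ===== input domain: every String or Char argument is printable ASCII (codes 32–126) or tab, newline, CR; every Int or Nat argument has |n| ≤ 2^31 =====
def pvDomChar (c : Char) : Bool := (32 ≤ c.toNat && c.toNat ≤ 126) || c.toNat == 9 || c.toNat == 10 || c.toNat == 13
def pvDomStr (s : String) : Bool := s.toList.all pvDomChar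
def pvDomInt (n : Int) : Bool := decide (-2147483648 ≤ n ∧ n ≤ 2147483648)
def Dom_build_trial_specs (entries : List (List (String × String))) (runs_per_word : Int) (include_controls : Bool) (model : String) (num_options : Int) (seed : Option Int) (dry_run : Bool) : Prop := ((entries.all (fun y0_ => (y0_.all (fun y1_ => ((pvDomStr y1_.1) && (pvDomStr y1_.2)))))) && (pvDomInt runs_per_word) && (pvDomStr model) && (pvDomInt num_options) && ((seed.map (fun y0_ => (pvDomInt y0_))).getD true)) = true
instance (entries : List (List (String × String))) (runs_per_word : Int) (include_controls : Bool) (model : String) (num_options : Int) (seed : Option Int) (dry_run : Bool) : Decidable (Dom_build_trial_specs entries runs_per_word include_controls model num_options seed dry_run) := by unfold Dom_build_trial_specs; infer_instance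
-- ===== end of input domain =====

-- B replaces A's interleaved counter loop by a two-phase build-then-number structure; same cost, different decomposition.

-- shared transliteration helpers (both Pythons do entry["word"] / f"{c:03d}" / seed+c)
-- dict lookup: first match in the association list; "" stands for the KeyError case, excluded by Pre_
def pvLookup (entry : List (String × String)) (k : String) : String :=
  ((entry.find? (fun p => p.1 == k)).map (·.2)).getD ""

-- f"{c:03d}" for c ≥ 0 (both programs only format counters ≥ 1): exact as str(c).zfill(3)
def pvRunId (c : Int) : String := PySem.Str.zfill (PySem.Int.toStr c) 3

def pvTrialSeed (seed : Option Int) (c : Int) : Option Int := seed.map (· + c)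

-- ===== PORT A =====
-- inner 'for run in range(runs_per_word)' loop: state (specs, counter)
def pvARuns (word domain model : String) (num_options : Int) (seed : Option Int) (dry_run : Bool) :
    Nat → (List (String × String × String × String × String × Int × Option Int × Bool) × Int) →
    (List (String × String × String × String × String × Int × Option Int × Bool) × Int)
  | 0, st => st
  | n + 1, (specs, c) =>
      pvARuns word domain model num_options seed dry_run n
        (specs ++ [(word, domain, "target_present", pvRunId c, model, num_options, pvTrialSeed seed c, dry_run)], c + 1)

-- the body of A's 'for entry in entries' loop
def pvAStep (runs_per_word : Int) (include_controls : Bool) (model : String) (num_options : Int) (seed : Option Int) (dry_run : Bool)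
    (st : List (String × String × String × String × String × Int × Option Int × Bool) × Int) (entry : List (String × String)) :
    List (String × String × String × String × String × Int × Option Int × Bool) × Int :=
  let word := pvLookup entry "word"
  let domain := pvLookup entry "target_domain"
  let st1 := pvARuns word domain model num_options seed dry_run runs_per_word.toNat st
  if include_controls then
    ["target_absent", "null_trial", "random_profile"].foldl (fun st2 t =>
      (st2.1 ++ [(word, domain, t, pvRunId st2.2, model, num_options, pvTrialSeed seed st2.2, dry_run)], st2.2 + 1)) st1
  else st1

def build_trial_specs (entries : List (List (String × String))) (runs_per_word : Int) (include_controls : Bool) (model : String) (num_options : Int) (seed : Option Int) (dry_run : Bool) : List (String × String × String × String × String × Int × Option Int × Bool) :=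
  (entries.foldl (pvAStep runs_per_word include_controls model num_options seed dry_run) ([], 1)).1

-- ===== PORT B =====
-- Phase 1: flat list of (word, domain, trial_type) descriptors
def pvBase (entries : List (List (String × String))) (runs_per_word : Int) (include_controls : Bool) : List (String × String × String) :=
  entries.foldl (fun acc entry =>
    let word := pvLookup entry "word"
    let domain := pvLookup entry "target_domain"
    acc ++ List.replicate runs_per_word.toNat (word, domain, "target_present")
        ++ (if include_controls then
              ["target_absent", "null_trial", "random_profile"].map (fun t => (word, domain, t))
            else [])) []

-- Phase 2: enumerate from 1 and assemble
def build_trial_specs_alt (entries : List (List (String × String))) (runs_per_word : Int) (include_controls : Bool) (model : String) (num_options : Int) (seed : Option Int) (dry_run : Bool) : List (String × String × String × String × String × Int × Option Int × Bool) :=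
  (PySem.List.enumerate (pvBase entries runs_per_word include_controls) 1).map
    (fun p => (p.2.1, p.2.2.1, p.2.2.2, pvRunId p.1, model, num_options, pvTrialSeed seed p.1, dry_run))

-- ===== PRECONDITION & SPEC =====
-- Pre_ excludes entries missing the "word" or "target_domain" key, on which Python A raises KeyError.
def Pre_build_trial_specs (entries : List (List (String × String))) (runs_per_word : Int) (include_controls : Bool) (model : String) (num_options : Int) (seed : Option Int) (dry_run : Bool) : Prop :=
  ∀ entry ∈ entries, (entry.find? (fun p => p.1 == "word")).isSome ∧ (entry.find? (fun p => p.1 == "target_domain")).isSome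
instance (entries : List (List (String × String))) (runs_per_word : Int) (include_controls : Bool) (model : String) (num_options : Int) (seed : Option Int) (dry_run : Bool) : Decidable (Pre_build_trial_specs entries runs_per_word include_controls model num_options seed dry_run) := by unfold Pre_build_trial_specs; infer_instance

def pvWitness_build_trial_specs : (List (List (String × String))) × Int × Bool × String × Int × Option Int × Bool :=
  ([[("word", "apple"), ("target_domain", "fruit")]], 2, true, "m", 4, some 10, false)

def Spec_build_trial_specs (entries : List (List (String × String))) (runs_per_word : Int) (include_controls : Bool) (model : String) (num_options : Int) (seed : Option Int) (dry_run : Bool) (out : List (String × String × String × String × String × Int × Option Int × Bool)) : Prop := out = build_trial_specs_alt entries runs_per_word include_controls model num_options seed dry_run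
instance (entries : List (List (String × String))) (runs_per_word : Int) (include_controls : Bool) (model : String) (num_options : Int) (seed : Option Int) (dry_run : Bool) (out : List (String × String × String × String × String × Int × Option Int × Bool)) : Decidable (Spec_build_trial_specs entries runs_per_word include_controls model num_options seed dry_run out) := by
  unfold Spec_build_trial_specs
  -- the 8-tuple's DecidableEq exceeds the default instance-search size; assemble it by hand
  have d4 : DecidableEq (String × String × Int × Option Int × Bool) := inferInstance
  have d3 : DecidableEq (String × String × String × Int × Option Int × Bool) := @instDecidableEqProd _ _ _ d4
  have d2 : DecidableEq (String × String × String × String × Int × Option Int × Bool) := @instDecidableEqProd _ _ _ d3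
  have d1 : DecidableEq (String × String × String × String × String × Int × Option Int × Bool) := @instDecidableEqProd _ _ _ d2
  exact @List.hasDecEq _ d1 _ _

-- ===== CLAIM (what is proved, stated in full; the proofs are below) =====
def Claim_equal_build_trial_specs : Prop := ∀ (entries : List (List (String × String))) (runs_per_word : Int) (include_controls : Bool) (model : String) (num_options : Int) (seed : Option Int) (dry_run : Bool), Dom_build_trial_specs entries runs_per_word include_controls model num_options seed dry_run → Pre_build_trial_specs entries runs_per_word include_controls model num_options seed dry_run → Spec_build_trial_specs entries runs_per_word include_controls model num_options seed dry_run (build_trial_specs entries runs_per_word include_controls model num_options seed dry_run)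

-- ===== LEMMAS AND PROOFS =====

-- "number the descriptors starting at c": what B's phase 2 computes from any start
def pvNumber (model : String) (num_options : Int) (seed : Option Int) (dry_run : Bool) (c : Int) (bs : List (String × String × String)) : List (String × String × String × String × String × Int × Option Int × Bool) :=
  (PySem.List.enumerate bs c).map
    (fun p => (p.2.1, p.2.2.1, p.2.2.2, pvRunId p.1, model, num_options, pvTrialSeed seed p.1, dry_run))

theorem pvNumber_append (model : String) (num_options : Int) (seed : Option Int) (dry_run : Bool) (c : Int) (bs cs : List (String × String × String)) :
    pvNumber model num_options seed dry_run c (bs ++ cs)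
      = pvNumber model num_options seed dry_run c bs ++ pvNumber model num_options seed dry_run (c + bs.length) cs := by
  simp [pvNumber, PySem.List.enumerate_append]

theorem pvARuns_spec (word domain model : String) (num_options : Int) (seed : Option Int) (dry_run : Bool)
    (n : Nat) (specs : List (String × String × String × String × String × Int × Option Int × Bool)) (c : Int) :
    pvARuns word domain model num_options seed dry_run n (specs, c)
      = (specs ++ pvNumber model num_options seed dry_run c (List.replicate n (word, domain, "target_present")), c + n) := by
  induction n generalizing specs c with
  | zero => simp [pvARuns, pvNumber, PySem.List.enumerate]
  | succ k ih =>
      rw [pvARuns, ih]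
      simp only [List.replicate_succ, pvNumber, PySem.List.enumerate_cons, List.map_cons,
        List.append_assoc, List.singleton_append]
      simp only [Prod.mk.injEq]
      first | (refine ⟨by trivial, by push_cast; ring⟩) | (push_cast; ring) | trivial

-- per-entry base descriptors and pvBase as structural recursion (helpers for the induction)
def pvEntryBase (runs_per_word : Int) (include_controls : Bool) (e : List (String × String)) : List (String × String × String) :=
  List.replicate runs_per_word.toNat (pvLookup e "word", pvLookup e "target_domain", "target_present")
    ++ (if include_controls then
          ["target_absent", "null_trial", "random_profile"].map (fun t => (pvLookup e "word", pvLookup e "target_domain", t))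
        else [])

def pvBaseFrom (runs_per_word : Int) (include_controls : Bool) : List (List (String × String)) → List (String × String × String)
  | [] => []
  | e :: rest => pvEntryBase runs_per_word include_controls e ++ pvBaseFrom runs_per_word include_controls rest

theorem pvAStep_spec (runs_per_word : Int) (include_controls : Bool) (model : String) (num_options : Int) (seed : Option Int) (dry_run : Bool)
    (specs : List (String × String × String × String × String × Int × Option Int × Bool)) (c : Int) (e : List (String × String)) :
    pvAStep runs_per_word include_controls model num_options seed dry_run (specs, c) e
      = (specs ++ pvNumber model num_options seed dry_run c (pvEntryBase runs_per_word include_controls e),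
         c + (pvEntryBase runs_per_word include_controls e).length) := by
  simp only [pvAStep]
  rw [pvARuns_spec]
  cases include_controls with
  | false =>
      simp [pvEntryBase]
  | true =>
      simp only [if_pos rfl, List.foldl_cons, List.foldl_nil, pvEntryBase, List.map_cons, List.map_nil]
      rw [pvNumber_append]
      simp only [List.length_replicate, pvNumber, PySem.List.enumerate_cons, PySem.List.enumerate_nil,
        List.map_cons, List.map_nil, List.append_assoc, List.singleton_append, List.nil_append,
        List.length_cons, List.length_nil, Prod.mk.injEq]
      simp only [if_true, Prod.mk.injEq]
      refine ⟨by trivial, ?_⟩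
      simp only [List.length_append, List.length_replicate, List.length_cons, List.length_nil]
      push_cast; ring

theorem pvFold_spec (runs_per_word : Int) (include_controls : Bool) (model : String) (num_options : Int) (seed : Option Int) (dry_run : Bool)
    (entries : List (List (String × String)))
    (specs : List (String × String × String × String × String × Int × Option Int × Bool)) (c : Int) :
    entries.foldl (pvAStep runs_per_word include_controls model num_options seed dry_run) (specs, c)
      = (specs ++ pvNumber model num_options seed dry_run c (pvBaseFrom runs_per_word include_controls entries),
         c + (pvBaseFrom runs_per_word include_controls entries).length) := by
  induction entries generalizing specs c with
  | nil => simp [pvBaseFrom, pvNumber, PySem.List.enumerate_nil]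
  | cons e rest ih =>
      rw [List.foldl_cons, pvAStep_spec, ih]
      simp only [pvBaseFrom, pvNumber_append, List.append_assoc, List.length_append, Prod.mk.injEq]
      first | (refine ⟨by trivial, by push_cast; ring⟩) | (push_cast; ring) | trivial

theorem pvBase_eq (entries : List (List (String × String))) (runs_per_word : Int) (include_controls : Bool) :
    pvBase entries runs_per_word include_controls = pvBaseFrom runs_per_word include_controls entries := by
  suffices h : ∀ acc, entries.foldl (fun acc entry =>
      let word := pvLookup entry "word"
      let domain := pvLookup entry "target_domain"
      acc ++ List.replicate runs_per_word.toNat (word, domain, "target_present")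
          ++ (if include_controls then
                ["target_absent", "null_trial", "random_profile"].map (fun t => (word, domain, t))
              else [])) acc = acc ++ pvBaseFrom runs_per_word include_controls entries by
    simpa [pvBase] using h []
  induction entries with
  | nil => simp [pvBaseFrom]
  | cons e rest ih =>
      intro acc
      rw [List.foldl_cons, ih]
      simp [pvBaseFrom, pvEntryBase, List.append_assoc]

-- ===== VERDICT (by name: the statement is the Claim_ definition above) =====
theorem build_trial_specs_spec : Claim_equal_build_trial_specs := by
  intro entries runs_per_word include_controls model num_options seed dry_run _ _
  show build_trial_specs entries runs_per_word include_controls model num_options seed dry_run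
      = build_trial_specs_alt entries runs_per_word include_controls model num_options seed dry_run
  rw [build_trial_specs, build_trial_specs_alt, pvBase_eq]
  rw [pvFold_spec]
  simp [pvNumber]
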